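-- pv_equiv track=rewrite | github.com/Dominik2077w/Germen_words_Compilation | tools.py | teilen_words_250_in_str_list
-- ===== SOURCE A (Python) =====
-- def teilen_words_250_in_str_list(classified_words_set):
--     """
--         将词集按每250个一组分割，并转换为字符串数组
--         :param classified_words_set: 输入的词集
--         :return: 字符串数组，每个字符串包含不超过250个空格分隔的单词
--         """
--     lst = sorted(classified_words_set)
--     limit = 125
--     result = []
--
--     # 按每250个词分组
--     for i in range(0, len(lst), limit):
--         # 取出当前组的词并用空格连接
--         group = lst[i:i + limit]
--         result.append(" ".join(group))
--
--     return result
-- ===== SOURCE B (Python) =====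
-- def teilen_words_250_in_str_list(classified_words_set):
--     # Single accumulator-driven pass over the sorted words instead of index-step slicing.
--     result = []
--     buf = []
--     for w in sorted(classified_words_set):
--         buf.append(w)
--         if len(buf) == 125:
--             result.append(" ".join(buf))
--             buf = []
--     if buf:
--         result.append(" ".join(buf))
--     return result
-- ===== Notes on version B (the rewrite author's own statement) =====
-- stated objective: alternative
-- what changed: Replaces index-stepped range/slice chunking with a single element-by-element pass that accumulates a buffer and flushes it every 125 words (and once at the end).
import Mathlib
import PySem

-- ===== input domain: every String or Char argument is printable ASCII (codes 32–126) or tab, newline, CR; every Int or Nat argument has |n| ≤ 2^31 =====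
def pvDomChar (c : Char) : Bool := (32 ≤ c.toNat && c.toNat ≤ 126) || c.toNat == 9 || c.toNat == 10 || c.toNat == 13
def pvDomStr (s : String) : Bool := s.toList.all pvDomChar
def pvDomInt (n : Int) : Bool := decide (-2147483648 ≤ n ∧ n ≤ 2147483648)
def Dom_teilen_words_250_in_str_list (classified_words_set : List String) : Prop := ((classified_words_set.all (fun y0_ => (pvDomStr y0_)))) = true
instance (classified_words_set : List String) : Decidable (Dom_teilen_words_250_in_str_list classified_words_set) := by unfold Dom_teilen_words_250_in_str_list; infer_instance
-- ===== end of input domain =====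

-- B replaces A's index-stepped slice chunking with one accumulator-driven pass (same cost; alternative decomposition).

-- ===== PORT A =====
def teilen_words_250_in_str_list (classified_words_set : List String) : List String :=
  let lst := PySem.List.sorted classified_words_set (fun w => w) false
  let limit : Int := 125
  (PySem.List.pyRange 0 (lst.length : Int) limit).foldl
    (fun result i =>
      let group := PySem.List.slice lst (some i) (some (i + limit))
      result ++ [PySem.Str.join " " group]) []

-- ===== PORT B =====
def teilen_words_250_in_str_list_alt (classified_words_set : List String) : List String :=
  let p := (PySem.List.sorted classified_words_set (fun w => w) false).foldl
    (fun (st : List String × List String) w =>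
      let buf := st.2 ++ [w]
      if buf.length = 125 then (st.1 ++ [PySem.Str.join " " buf], ([] : List String))
      else (st.1, buf)) ([], [])
  if p.2 = [] then p.1 else p.1 ++ [PySem.Str.join " " p.2]

-- ===== PRECONDITION & SPEC =====
def Spec_teilen_words_250_in_str_list (classified_words_set : List String) (out : List String) : Prop := out = teilen_words_250_in_str_list_alt classified_words_set
instance (classified_words_set : List String) (out : List String) : Decidable (Spec_teilen_words_250_in_str_list classified_words_set out) := by unfold Spec_teilen_words_250_in_str_list; infer_instance

-- ===== CLAIM (what is proved, stated in full; the proofs are below) =====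
def Claim_equal_teilen_words_250_in_str_list : Prop := ∀ (classified_words_set : List String), Dom_teilen_words_250_in_str_list classified_words_set → Spec_teilen_words_250_in_str_list classified_words_set (teilen_words_250_in_str_list classified_words_set)

-- ===== LEMMAS AND PROOFS =====

-- Reference chunking: split l into groups of 125 and join each.
def pvChunks (l : List String) : List String :=
  if h : l = [] then []
  else PySem.Str.join " " (l.take 125) :: pvChunks (l.drop 125)
termination_by l.length
decreasing_by
  have : l.length ≠ 0 := by simpa [List.length_eq_zero_iff] using h
  simp; omega

theorem pvChunks_nil : pvChunks [] = [] := by simp [pvChunks]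

theorem pvChunks_ne_nil (l : List String) (h : l ≠ []) :
    pvChunks l = PySem.Str.join " " (l.take 125) :: pvChunks (l.drop 125) := by
  rw [pvChunks]; simp [h]

theorem pyRange125_nil (a b : Int) (h : b ≤ a) :
    PySem.List.pyRange a b 125 = [] := by
  rw [PySem.List.pyRange_of_pos a b (by norm_num)]
  simp [show ¬ a < b by omega]

theorem pyRange125_cons (a b : Int) (h : a < b) :
    PySem.List.pyRange a b 125 = a :: PySem.List.pyRange (a + 125) b 125 := by
  rw [PySem.List.pyRange_of_pos a b (by norm_num),
      PySem.List.pyRange_of_pos (a + 125) b (by norm_num)]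
  by_cases h2 : a + 125 < b
  · have hcount : ((b - a + 125 - 1) / 125).toNat
        = ((b - (a + 125) + 125 - 1) / 125).toNat + 1 := by omega
    simp only [h, h2, if_pos, hcount, List.range_succ_eq_map, List.map_cons, List.map_map]
    refine congrArg₂ List.cons (by simp) ?_
    apply List.map_congr_left; intro k _; simp [Function.comp]; ring
  · have hcount : ((b - a + 125 - 1) / 125).toNat = 1 := by omega
    simp [h, h2, hcount, List.range_succ]

theorem auxA (m : Nat) : ∀ (i : Nat) (lst res : List String),
    lst.length ≤ i + 125 * m →
    (PySem.List.pyRange (i : Int) (lst.length : Int) 125).foldl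
      (fun result j =>
        let group := PySem.List.slice lst (some j) (some (j + 125))
        result ++ [PySem.Str.join " " group]) res
      = res ++ pvChunks (lst.drop i) := by
  induction m with
  | zero =>
      intro i lst res h
      rw [pyRange125_nil _ _ (by exact_mod_cast by omega)]
      rw [List.drop_of_length_le (by omega), pvChunks_nil]
      simp
  | succ m ih =>
      intro i lst res h
      by_cases hi : i < lst.length
      · rw [pyRange125_cons _ _ (by exact_mod_cast hi)]
        simp only [List.foldl_cons]
        have hslice : PySem.List.slice lst (some (i : Int)) (some ((i : Int) + 125))
            = (lst.drop i).take 125 := by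
          have := PySem.List.slice_natCast_add lst i 125
          simpa using this
        have hstep : ((i : Int) + 125) = ((i + 125 : Nat) : Int) := by push_cast; ring
        rw [hstep]
        rw [ih (i + 125) lst _ (by omega)]
        rw [pvChunks_ne_nil (lst.drop i) (by
          intro hnil
          have := congrArg List.length hnil
          simp at this; omega)]
        have hdd : lst.drop (i + 125) = (lst.drop i).drop 125 := by
          rw [List.drop_drop]
        rw [hstep] at hslice
        rw [hdd, hslice]
        simp
      · rw [pyRange125_nil _ _ (by exact_mod_cast by omega)]
        rw [List.drop_of_length_le (by omega), pvChunks_nil]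
        simp

theorem auxB : ∀ (l res buf : List String), buf.length < 125 →
    (let p := l.foldl
        (fun (st : List String × List String) w =>
          let b := st.2 ++ [w]
          if b.length = 125 then (st.1 ++ [PySem.Str.join " " b], ([] : List String))
          else (st.1, b)) (res, buf)
      if p.2 = [] then p.1 else p.1 ++ [PySem.Str.join " " p.2])
      = res ++ pvChunks (buf ++ l) := by
  intro l
  induction l with
  | nil =>
      intro res buf hb
      by_cases hbuf : buf = []
      · simp [hbuf, pvChunks_nil]
      · rw [List.append_nil, pvChunks_ne_nil buf hbuf]
        rw [List.take_of_length_le (by omega), List.drop_of_length_le (by omega), pvChunks_nil]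
        simp [hbuf]
  | cons w l ih =>
      intro res buf hb
      simp only [List.foldl_cons]
      by_cases h125 : (buf ++ [w]).length = 125
      · simp only [h125, if_pos]
        rw [ih (res ++ [PySem.Str.join " " (buf ++ [w])]) [] (by norm_num)]
        have hne : buf ++ w :: l ≠ [] := by simp
        rw [show buf ++ w :: l = (buf ++ [w]) ++ l by simp]
        rw [pvChunks_ne_nil ((buf ++ [w]) ++ l) (by simp)]
        have hlen : (buf ++ [w]).length = 125 := h125
        rw [List.take_append_of_le_length (by omega), List.drop_append_of_le_length (by omega)]
        rw [List.take_of_length_le (by omega), List.drop_of_length_le (by omega)]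
        simp
      · simp only [h125, if_neg, not_false_iff]
        rw [ih res (buf ++ [w]) (by simp at h125 ⊢; omega)]
        simp

theorem portA_eq_chunks (cws : List String) :
    teilen_words_250_in_str_list cws
      = pvChunks (PySem.List.sorted cws (fun w => w) false) := by
  unfold teilen_words_250_in_str_list
  have := auxA ((PySem.List.sorted cws (fun w => w) false).length)
    0 (PySem.List.sorted cws (fun w => w) false) [] (by omega)
  simpa using this

theorem portB_eq_chunks (cws : List String) :
    teilen_words_250_in_str_list_alt cws
      = pvChunks (PySem.List.sorted cws (fun w => w) false) := by
  unfold teilen_words_250_in_str_list_alt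
  have := auxB (PySem.List.sorted cws (fun w => w) false) [] [] (by norm_num)
  simpa using this

-- ===== VERDICT (by name: the statement is the Claim_ definition above) =====
theorem teilen_words_250_in_str_list_spec : Claim_equal_teilen_words_250_in_str_list := by
  intro cws _
  unfold Spec_teilen_words_250_in_str_list
  rw [portA_eq_chunks, portB_eq_chunks]
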